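-- pv_equiv track=rewrite | github.com/onkelhoy/2dv50e-thesis | work/Code/experiments/fingerprint.py | accuracy_calculator
-- ===== SOURCE A (Python) =====
-- from collections import Counter
--
-- def accuracy_calculator(duplicate_groups, non_duplicate_list, lonely_imgs):
--     """
--     Method to calculate the accuracy of duplicate detection.
--     """
--     true_pos = 0
--     false_pos = 0
--     true_neg = 0
--
--     if lonely_imgs:
--         for img in non_duplicate_list:
--             if img in lonely_imgs:
--                 true_neg += 1
--
--     false_neg = len(non_duplicate_list) - true_neg
--
--     for dup_group in duplicate_groups:
--         relevant_parts = [item.split("/")[-1].split("_")[0:5] for item in dup_group]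
--         relevant_parts_combined = ["_".join(parts) for parts in relevant_parts]
--         most_common_segment, _ = Counter(relevant_parts_combined).most_common(1)[0]
--
--         for path in dup_group:
--             relevant_part = "_".join(path.split("/")[-1].split("_")[:5])
--             match = most_common_segment == relevant_part
--
--             if match:
--                 true_pos += 1
--             else:
--                 false_pos += 1
--
--     return true_pos, false_pos, true_neg, false_neg
-- ===== SOURCE B (Python) =====
-- from collections import Counter
--
-- def accuracy_calculator(duplicate_groups, non_duplicate_list, lonely_imgs):
--     """
--     Calculate duplicate-detection accuracy: per group, read the top key count
--     from the Counter instead of re-scanning the group path by path.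
--     """
--     lonely = set(lonely_imgs)
--     true_neg = sum(1 for img in non_duplicate_list if img in lonely)
--     false_neg = len(non_duplicate_list) - true_neg
--
--     true_pos = 0
--     false_pos = 0
--     for group in duplicate_groups:
--         keys = ["_".join(p.split("/")[-1].split("_")[:5]) for p in group]
--         top = max(Counter(keys).values())
--         true_pos += top
--         false_pos += len(group) - top
--
--     return true_pos, false_pos, true_neg, false_neg
-- ===== Notes on version B (the rewrite author's own statement) =====
-- stated objective: faster
-- what changed: A's second per-group pass (re-deriving each path's key and comparing it to the most-common segment) is deleted: B reads the maximal key count off the Counter (true_pos += top, false_pos += len(group) - top), and the O(n*m) per-image list membership scan for true_neg becomes an O(1) set lookup.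
import Mathlib
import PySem

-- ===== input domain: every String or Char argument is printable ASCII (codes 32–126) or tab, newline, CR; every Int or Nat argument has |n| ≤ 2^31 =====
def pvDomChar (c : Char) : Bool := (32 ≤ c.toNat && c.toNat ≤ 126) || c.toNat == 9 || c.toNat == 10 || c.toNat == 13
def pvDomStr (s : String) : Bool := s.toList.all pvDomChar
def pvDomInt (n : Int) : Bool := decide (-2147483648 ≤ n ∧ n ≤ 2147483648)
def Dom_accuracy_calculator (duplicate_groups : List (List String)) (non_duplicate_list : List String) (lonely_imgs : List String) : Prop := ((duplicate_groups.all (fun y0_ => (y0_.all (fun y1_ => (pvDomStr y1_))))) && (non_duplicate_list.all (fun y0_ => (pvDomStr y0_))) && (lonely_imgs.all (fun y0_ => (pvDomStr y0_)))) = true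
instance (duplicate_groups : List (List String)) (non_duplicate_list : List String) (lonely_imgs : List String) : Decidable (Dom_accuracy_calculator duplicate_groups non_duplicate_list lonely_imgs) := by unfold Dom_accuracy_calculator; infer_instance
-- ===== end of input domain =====

-- B deletes A's second per-group pass (it reads the maximal key count off the Counter: true_pos += top,
-- false_pos += len(group) - top) and replaces the per-image list membership scan by a set lookup (objective: faster, measured).

-- ===== PORT A =====
-- s.split(sep): PySem.Str.split? is none only for sep = ""; the separators here are literal "/" and "_", so .getD [] is never taken.
def accuracy_calculator (duplicate_groups : List (List String)) (non_duplicate_list : List String) (lonely_imgs : List String) : List Int :=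
  -- tn loop runs only when lonely_imgs is truthy (nonempty)
  let true_neg : Int :=
    if lonely_imgs ≠ [] then
      non_duplicate_list.foldl (fun tn img => if lonely_imgs.contains img then tn + 1 else tn) 0
    else 0
  let false_neg : Int := (non_duplicate_list.length : Int) - true_neg
  let tpfp : Int × Int :=
    duplicate_groups.foldl (fun acc dup_group =>
      let relevant_parts := dup_group.map (fun item =>
        PySem.List.slice ((PySem.Str.split? (PySem.List.pyGetD ((PySem.Str.split? item "/").getD []) (-1) "") "_").getD []) (some 0) (some 5))
      let relevant_parts_combined := relevant_parts.map (fun parts => PySem.Str.join "_" parts)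
      -- Counter(..).most_common(1)[0]: first item of the count-descending stable sort; [] = IndexError (excluded by Pre_)
      match PySem.List.sorted (PySem.Dict.counter relevant_parts_combined).items (fun kv => kv.2) true with
      | [] => acc
      | (most_common_segment, _) :: _ =>
        dup_group.foldl (fun acc path =>
          let relevant_part := PySem.Str.join "_"
            (PySem.List.slice ((PySem.Str.split? (PySem.List.pyGetD ((PySem.Str.split? path "/").getD []) (-1) "") "_").getD []) none (some 5))
          if most_common_segment == relevant_part then (acc.1 + 1, acc.2) else (acc.1, acc.2 + 1)) acc)
      (0, 0)
  [tpfp.1, tpfp.2, true_neg, false_neg]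

-- ===== PORT B =====
def accuracy_calculator_alt (duplicate_groups : List (List String)) (non_duplicate_list : List String) (lonely_imgs : List String) : List Int :=
  let lonely := PySem.Set.ofList lonely_imgs
  let true_neg : Int := (non_duplicate_list.countP (fun img => PySem.Set.contains lonely img) : Int)
  let false_neg : Int := (non_duplicate_list.length : Int) - true_neg
  let tpfp : Int × Int :=
    duplicate_groups.foldl (fun acc group =>
      let keys := group.map (fun p => PySem.Str.join "_"
        (PySem.List.slice ((PySem.Str.split? (PySem.List.pyGetD ((PySem.Str.split? p "/").getD []) (-1) "") "_").getD []) none (some 5)))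
      -- max(Counter(keys).values()); empty group (ValueError in Python) is excluded by Pre_
      let top : Int := (PySem.List.max? (PySem.Dict.counter keys).values (fun v => v)).getD 0
      (acc.1 + top, acc.2 + (group.length : Int) - top))
      (0, 0)
  [tpfp.1, tpfp.2, true_neg, false_neg]

-- ===== PRECONDITION & SPEC =====
-- Pre_ excludes an empty duplicate group, on which A raises IndexError (most_common(1)[0]) and B raises ValueError (max of empty).
def Pre_accuracy_calculator (duplicate_groups : List (List String)) (non_duplicate_list : List String) (lonely_imgs : List String) : Prop :=
  ∀ g ∈ duplicate_groups, g ≠ []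
instance (duplicate_groups : List (List String)) (non_duplicate_list : List String) (lonely_imgs : List String) : Decidable (Pre_accuracy_calculator duplicate_groups non_duplicate_list lonely_imgs) := by unfold Pre_accuracy_calculator; infer_instance

def pvWitness_accuracy_calculator : List (List String) × List String × List String :=
  ([["a/x_1_2_3_4_5_z", "x_1_2_3_4_5"], ["b_1"]], ["p", "q"], ["p"])

def Spec_accuracy_calculator (duplicate_groups : List (List String)) (non_duplicate_list : List String) (lonely_imgs : List String) (out : List Int) : Prop := out = accuracy_calculator_alt duplicate_groups non_duplicate_list lonely_imgs
instance (duplicate_groups : List (List String)) (non_duplicate_list : List String) (lonely_imgs : List String) (out : List Int) : Decidable (Spec_accuracy_calculator duplicate_groups non_duplicate_list lonely_imgs out) := by unfold Spec_accuracy_calculator; infer_instance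

-- ===== CLAIM (what is proved, stated in full; the proofs are below) =====
def Claim_equal_accuracy_calculator : Prop := ∀ (duplicate_groups : List (List String)) (non_duplicate_list : List String) (lonely_imgs : List String), Dom_accuracy_calculator duplicate_groups non_duplicate_list lonely_imgs → Pre_accuracy_calculator duplicate_groups non_duplicate_list lonely_imgs → Spec_accuracy_calculator duplicate_groups non_duplicate_list lonely_imgs (accuracy_calculator duplicate_groups non_duplicate_list lonely_imgs)

-- ===== LEMMAS AND PROOFS =====

-- A's inner scan over the group counts the paths whose key equals seg
theorem pv_match_loop (seg : String) (kf : String → String) (l : List String) (acc : Int × Int) :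
    l.foldl (fun acc path => if seg == kf path then (acc.1 + 1, acc.2) else (acc.1, acc.2 + 1)) acc
      = (acc.1 + ((l.map kf).count seg : Int), acc.2 + (l.length : Int) - ((l.map kf).count seg : Int)) := by
  induction l generalizing acc with
  | nil => simp
  | cons x t ih =>
    simp only [List.foldl_cons, List.map_cons, List.length_cons, List.count_cons]
    by_cases h : seg = kf x
    · have hs : (seg == kf x) = true := beq_iff_eq.mpr h
      have hb : (kf x == seg) = true := beq_iff_eq.mpr h.symm
      rw [if_pos hs, ih, Prod.mk.injEq]
      refine ⟨?_, ?_⟩ <;> (simp only [hb, if_true]; push_cast; ring)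
    · have hs : (seg == kf x) = false := beq_eq_false_iff_ne.mpr h
      have hb : (kf x == seg) = false := beq_eq_false_iff_ne.mpr (fun hh => h hh.symm)
      rw [if_neg (by simp [hs]), ih, Prod.mk.injEq]
      refine ⟨?_, ?_⟩ <;> (simp only [hb, Bool.false_eq_true, if_false]; push_cast; ring)

-- the head of the count-descending sort of Counter(keys).items carries count = max of the counts
theorem pv_head_count (keys : List String) (seg : String) (c : Int) (rest : List (String × Int))
    (h : PySem.List.sorted (PySem.Dict.counter keys).items (fun kv => kv.2) true = (seg, c) :: rest) :
    c = (keys.count seg : Int) ∧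
    (PySem.List.max? (PySem.Dict.counter keys).values (fun v => v)).getD 0 = c := by
  have hmem : (seg, c) ∈ (PySem.Dict.counter keys).items :=
    (PySem.List.sorted_perm (PySem.Dict.counter keys).items (fun kv => kv.2) true).mem_iff.mp
      (h ▸ List.mem_cons_self)
  have hc : c = (keys.count seg : Int) := by
    have hmem' := hmem
    rw [PySem.Dict.items_counter] at hmem'
    obtain ⟨k, hkm, hk⟩ := List.mem_map.mp hmem'
    have h1 : k = seg := congrArg Prod.fst hk
    have h2 : ((keys.count k : Int)) = c := congrArg Prod.snd hk
    subst h1; exact h2.symm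
  have hmax : ∀ y ∈ (PySem.Dict.counter keys).items, y.2 ≤ c :=
    PySem.List.key_head_sorted_rev_ge _ _ h
  have hcv : c ∈ (PySem.Dict.counter keys).values := by
    simp only [PySem.Dict.values]
    exact List.mem_map.mpr ⟨(seg, c), hmem, rfl⟩
  refine ⟨hc, ?_⟩
  cases hm : PySem.List.max? (PySem.Dict.counter keys).values (fun v => v) with
  | none =>
    rw [PySem.List.max?_eq_none_iff] at hm
    rw [hm] at hcv
    simp at hcv
  | some m =>
    have hmm := PySem.List.max?_mem hm
    have hle : c ≤ m := PySem.List.max?_isMax hm c hcv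
    have hge : m ≤ c := by
      obtain ⟨a, ha⟩ :=
        (by simpa [PySem.Dict.values] using hmm : ∃ a, (a, m) ∈ (PySem.Dict.counter keys).items)
      exact hmax (a, m) ha
    simp only [Option.getD_some]
    omega

-- per-group step: A's match pass equals B's arithmetic on the top count
theorem pv_group_step (g : List String) (hg : g ≠ []) (acc : Int × Int) :
    (match PySem.List.sorted (PySem.Dict.counter ((g.map (fun item => PySem.List.slice ((PySem.Str.split? (PySem.List.pyGetD ((PySem.Str.split? item "/").getD []) (-1) "") "_").getD []) (some 0) (some 5))).map (fun parts => PySem.Str.join "_" parts))).items (fun kv => kv.2) true with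
     | [] => acc
     | (most_common_segment, _) :: _ =>
       g.foldl (fun acc path =>
         if most_common_segment == PySem.Str.join "_" (PySem.List.slice ((PySem.Str.split? (PySem.List.pyGetD ((PySem.Str.split? path "/").getD []) (-1) "") "_").getD []) none (some 5)) then (acc.1 + 1, acc.2) else (acc.1, acc.2 + 1)) acc)
    =
    (acc.1 + (PySem.List.max? (PySem.Dict.counter (g.map (fun p => PySem.Str.join "_" (PySem.List.slice ((PySem.Str.split? (PySem.List.pyGetD ((PySem.Str.split? p "/").getD []) (-1) "") "_").getD []) none (some 5))))).values (fun v => v)).getD 0,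
     acc.2 + (g.length : Int) - (PySem.List.max? (PySem.Dict.counter (g.map (fun p => PySem.Str.join "_" (PySem.List.slice ((PySem.Str.split? (PySem.List.pyGetD ((PySem.Str.split? p "/").getD []) (-1) "") "_").getD []) none (some 5))))).values (fun v => v)).getD 0) := by
  simp only [PySem.List.slice_zero_start, List.map_map, Function.comp_def]
  set kf2 : String → String := fun p => PySem.Str.join "_"
    (PySem.List.slice ((PySem.Str.split? (PySem.List.pyGetD ((PySem.Str.split? p "/").getD []) (-1) "") "_").getD []) none (some 5)) with hkf2
  have hkeys : (g.map kf2) ≠ [] := by simpa using hg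
  cases hs : PySem.List.sorted (PySem.Dict.counter (g.map kf2)).items (fun kv => kv.2) true with
  | nil =>
    exfalso
    rw [PySem.List.sorted_eq_nil_iff, PySem.Dict.items_counter, List.map_eq_nil_iff] at hs
    rcases List.exists_mem_of_ne_nil _ hkeys with ⟨x, hx⟩
    have hx2 := (PySem.Set.mem_ofList (g.map kf2) x).mpr hx
    rw [hs] at hx2
    simp at hx2
  | cons hd tl =>
    obtain ⟨seg, c⟩ := hd
    obtain ⟨hc, htop⟩ := pv_head_count (g.map kf2) seg c tl hs
    refine Eq.trans (b := (acc.1 + ((g.map kf2).count seg : Int),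
      acc.2 + (g.length : Int) - ((g.map kf2).count seg : Int))) ?_ ?_
    · exact pv_match_loop seg kf2 g acc
    · rw [htop, hc, Prod.mk.injEq]
      exact ⟨rfl, by ring⟩

-- tn: A's guarded membership loop equals B's countP over the set
theorem pv_tn (ndl li : List String) :
    (if li ≠ [] then ndl.foldl (fun tn img => if li.contains img then tn + 1 else tn) (0 : Int) else 0)
      = (ndl.countP (fun img => PySem.Set.contains (PySem.Set.ofList li) img) : Int) := by
  have hc : ∀ img : String, PySem.Set.contains (PySem.Set.ofList li) img = li.contains img := by
    intro img
    rw [Bool.eq_iff_iff, PySem.Set.contains_iff, PySem.Set.mem_ofList, List.contains_iff_mem]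
  have hfold : ∀ (l : List String) (a : Int),
      l.foldl (fun tn img => if li.contains img then tn + 1 else tn) a
        = a + (l.countP (fun img => li.contains img) : Int) := by
    intro l
    induction l with
    | nil => simp
    | cons x t ih =>
      intro a
      simp only [List.foldl_cons, List.countP_cons]
      by_cases h : li.contains x = true
      · rw [if_pos h, ih]; simp only [h, if_true]; push_cast; ring
      · rw [if_neg h, ih]; simp only [h, Bool.false_eq_true, if_false]; push_cast; ring
  by_cases h : li = []
  · subst h; simp
  · rw [if_pos h, hfold, zero_add]
    congr 1
    exact (List.countP_congr (fun x _ => by rw [hc x])).symm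

-- ===== VERDICT (by name: the statement is the Claim_ definition above) =====
theorem accuracy_calculator_spec : Claim_equal_accuracy_calculator := by
  intro dg ndl li _ hpre
  unfold Spec_accuracy_calculator accuracy_calculator accuracy_calculator_alt
  simp only []
  rw [pv_tn ndl li]
  have hfold : ∀ (l : List (List String)), (∀ g ∈ l, g ≠ []) → ∀ acc : Int × Int,
      l.foldl (fun acc dup_group =>
        match PySem.List.sorted (PySem.Dict.counter ((dup_group.map (fun item => PySem.List.slice ((PySem.Str.split? (PySem.List.pyGetD ((PySem.Str.split? item "/").getD []) (-1) "") "_").getD []) (some 0) (some 5))).map (fun parts => PySem.Str.join "_" parts))).items (fun kv => kv.2) true with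
        | [] => acc
        | (most_common_segment, _) :: _ =>
          dup_group.foldl (fun acc path =>
            if most_common_segment == PySem.Str.join "_" (PySem.List.slice ((PySem.Str.split? (PySem.List.pyGetD ((PySem.Str.split? path "/").getD []) (-1) "") "_").getD []) none (some 5)) then (acc.1 + 1, acc.2) else (acc.1, acc.2 + 1)) acc) acc
      = l.foldl (fun acc group =>
          (acc.1 + (PySem.List.max? (PySem.Dict.counter (group.map (fun p => PySem.Str.join "_" (PySem.List.slice ((PySem.Str.split? (PySem.List.pyGetD ((PySem.Str.split? p "/").getD []) (-1) "") "_").getD []) none (some 5))))).values (fun v => v)).getD 0,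
           acc.2 + (group.length : Int) - (PySem.List.max? (PySem.Dict.counter (group.map (fun p => PySem.Str.join "_" (PySem.List.slice ((PySem.Str.split? (PySem.List.pyGetD ((PySem.Str.split? p "/").getD []) (-1) "") "_").getD []) none (some 5))))).values (fun v => v)).getD 0)) acc := by
    intro l hl
    induction l with
    | nil => intro acc; rfl
    | cons g t ih =>
      intro acc
      simp only [List.foldl_cons]
      rw [pv_group_step g (hl g List.mem_cons_self) acc]
      exact ih (fun g' hg' => hl g' (List.mem_cons_of_mem _ hg')) _
  rw [hfold dg hpre (0, 0)]
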